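-- pv_equiv track=rewrite | github.com/DerReparator/advent-of-code-2023 | day02/py/solution1.py | filterGames
-- ===== SOURCE A (Python) =====
-- from typing import List, Tuple, Dict
--
-- THRESHOLD_RED = 12
--
-- THRESHOLD_GREEN = 13
--
-- THRESHOLD_BLUE = 14
--
-- def checkAmountOfCubes(round_record: Dict[str, int], color: str, amount: int) -> bool:
--     if round_record.get(color, 0) > amount:
--         return True # this is bad. max number of colors
--     return False
--
-- def filterGames(games: List[List[Dict[str, int]]]) -> List[int]:
--     ret: List[int] = []
--     for i, game in enumerate(games, start=1):
--         if any([checkAmountOfCubes(round_record, "red", THRESHOLD_RED) for round_record in game]):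
--             continue
--         if any([checkAmountOfCubes(round_record, "blue", THRESHOLD_BLUE) for round_record in game]):
--             continue
--         if any([checkAmountOfCubes(round_record, "green", THRESHOLD_GREEN) for round_record in game]):
--             continue
--         ret.append(i)
--     return ret
-- ===== SOURCE B (Python) =====
-- def filterGames(games):
--     # Different strategy: per game, aggregate the MAXIMUM count seen for each
--     # color across all rounds (one max-fold), then compare the three maxima
--     # against the thresholds once; recurse over games building the result.
--     def maxima(game):
--         r = g = b = 0
--         for rr in game:
--             r = max(r, rr.get("red", 0))
--             g = max(g, rr.get("green", 0))
--             b = max(b, rr.get("blue", 0))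
--         return r, g, b
--
--     def go(idx, rest):
--         if not rest:
--             return []
--         r, g, b = maxima(rest[0])
--         tail = go(idx + 1, rest[1:])
--         return ([idx] + tail) if (r <= 12 and g <= 13 and b <= 14) else tail
--
--     return go(1, games)
-- ===== Notes on version B (the rewrite author's own statement) =====
-- stated objective: alternative
-- what changed: Instead of A's three boolean early-exit any-scans per game, B aggregates the running maximum of each color over the game's rounds in one max-fold and compares the three maxima to the thresholds once, recursing over the games to build the index list.
import Mathlib
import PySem

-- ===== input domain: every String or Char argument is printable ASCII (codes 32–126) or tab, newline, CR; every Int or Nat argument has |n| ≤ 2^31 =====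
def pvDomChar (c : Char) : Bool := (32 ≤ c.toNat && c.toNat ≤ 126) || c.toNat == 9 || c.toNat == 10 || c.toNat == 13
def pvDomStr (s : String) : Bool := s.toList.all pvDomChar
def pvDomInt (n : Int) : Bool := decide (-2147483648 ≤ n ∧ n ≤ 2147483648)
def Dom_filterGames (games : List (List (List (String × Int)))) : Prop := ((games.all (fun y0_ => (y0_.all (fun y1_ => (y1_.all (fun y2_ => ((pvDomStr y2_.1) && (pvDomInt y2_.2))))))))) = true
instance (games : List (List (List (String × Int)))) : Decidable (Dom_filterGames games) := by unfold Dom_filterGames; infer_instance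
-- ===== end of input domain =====

-- B replaces A's three separate early-exit boolean any-scans per game by a single
-- max-aggregation fold (running maximum per color) compared to the thresholds once,
-- recursing over the games (alternative decomposition; same cost).

-- ===== PORT A =====
def checkAmountOfCubes (round_record : List (String × Int)) (color : String) (amount : Int) : Bool :=
  if ((round_record.lookup color).getD 0) > amount then true else false

def filterGames (games : List (List (List (String × Int)))) : List Int :=
  (PySem.List.enumerate games 1).foldl (fun ret p =>
    if (p.2.map (fun round_record => checkAmountOfCubes round_record "red" 12)).any id then ret
    else if (p.2.map (fun round_record => checkAmountOfCubes round_record "blue" 14)).any id then ret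
    else if (p.2.map (fun round_record => checkAmountOfCubes round_record "green" 13)).any id then ret
    else ret ++ [p.1]) []

-- ===== PORT B =====
def pvMaxima (game : List (List (String × Int))) : Int × Int × Int :=
  game.foldl (fun s rr =>
    (max s.1 ((rr.lookup "red").getD 0),
     max s.2.1 ((rr.lookup "green").getD 0),
     max s.2.2 ((rr.lookup "blue").getD 0))) (0, 0, 0)

def pvGo (idx : Int) : List (List (List (String × Int))) → List Int
  | [] => []
  | game :: rest =>
    let m := pvMaxima game
    let tail := pvGo (idx + 1) rest
    if m.1 ≤ 12 ∧ m.2.1 ≤ 13 ∧ m.2.2 ≤ 14 then idx :: tail else tail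

def filterGames_alt (games : List (List (List (String × Int)))) : List Int :=
  pvGo 1 games

-- ===== PRECONDITION & SPEC =====
def Spec_filterGames (games : List (List (List (String × Int)))) (out : List Int) : Prop := out = filterGames_alt games
instance (games : List (List (List (String × Int)))) (out : List Int) : Decidable (Spec_filterGames games out) := by unfold Spec_filterGames; infer_instance

-- ===== CLAIM (what is proved, stated in full; the proofs are below) =====
def Claim_equal_filterGames : Prop := ∀ (games : List (List (List (String × Int)))), Dom_filterGames games → Spec_filterGames games (filterGames games)

-- ===== LEMMAS AND PROOFS =====

-- a max-fold is ≤ t iff the seed and every mapped element are ≤ t (component-wise tool)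
lemma pvMaxFold_le (game : List (List (String × Int))) (f : List (String × Int) → Int)
    (c t : Int) :
    game.foldl (fun a rr => max a (f rr)) c ≤ t ↔ c ≤ t ∧ ∀ rr ∈ game, f rr ≤ t := by
  induction game generalizing c with
  | nil => simp
  | cons x xs ih =>
    simp [List.foldl_cons, ih]
    tauto

-- pvMaxima is the triple of three independent max-folds
lemma pvMaxima_eq (game : List (List (String × Int))) :
    pvMaxima game =
      (game.foldl (fun a rr => max a ((rr.lookup "red").getD 0)) 0,
       game.foldl (fun a rr => max a ((rr.lookup "green").getD 0)) 0,
       game.foldl (fun a rr => max a ((rr.lookup "blue").getD 0)) 0) := by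
  unfold pvMaxima
  induction game using List.reverseRecOn with
  | nil => rfl
  | append_singleton xs x ih => simp [List.foldl_append, ih]

-- per game: B's maxima test equals A's "no color exceeded" test
lemma pvValid_eq (game : List (List (String × Int))) :
    ((pvMaxima game).1 ≤ 12 ∧ (pvMaxima game).2.1 ≤ 13 ∧ (pvMaxima game).2.2 ≤ 14)
    ↔ ((game.map (fun rr => checkAmountOfCubes rr "red" 12)).any id = false
       ∧ (game.map (fun rr => checkAmountOfCubes rr "blue" 14)).any id = false
       ∧ (game.map (fun rr => checkAmountOfCubes rr "green" 13)).any id = false) := by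
  rw [pvMaxima_eq]
  simp [pvMaxFold_le, checkAmountOfCubes, not_lt]
  tauto

-- A's fold over the enumerated tail equals acc ++ B's recursion from the same index
lemma pvFold_eq_go (games : List (List (List (String × Int)))) (n : Int) (acc : List Int) :
    (PySem.List.enumerate games n).foldl (fun ret p =>
      if (p.2.map (fun rr => checkAmountOfCubes rr "red" 12)).any id then ret
      else if (p.2.map (fun rr => checkAmountOfCubes rr "blue" 14)).any id then ret
      else if (p.2.map (fun rr => checkAmountOfCubes rr "green" 13)).any id then ret
      else ret ++ [p.1]) acc
    = acc ++ pvGo n games := by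
  induction games generalizing n acc with
  | nil => simp [PySem.List.enumerate_nil, pvGo]
  | cons g gs ih =>
    rw [PySem.List.enumerate_cons, List.foldl_cons, pvGo]
    by_cases h : (pvMaxima g).1 ≤ 12 ∧ (pvMaxima g).2.1 ≤ 13 ∧ (pvMaxima g).2.2 ≤ 14
    · obtain ⟨hr, hb, hg⟩ := pvValid_eq g |>.mp h
      simp only [hr, hb, hg, if_neg Bool.false_ne_true, if_pos h, ih]
      simp
    · simp only [if_neg h]
      cases h1 : (g.map (fun rr => checkAmountOfCubes rr "red" 12)).any id <;>
        cases h2 : (g.map (fun rr => checkAmountOfCubes rr "blue" 14)).any id <;>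
          cases h3 : (g.map (fun rr => checkAmountOfCubes rr "green" 13)).any id <;>
            first
              | exact absurd (pvValid_eq g |>.mpr ⟨h1, h2, h3⟩) h
              | simp only [reduceIte, Bool.false_eq_true, ih]

-- ===== VERDICT (by name: the statement is the Claim_ definition above) =====
theorem filterGames_spec : Claim_equal_filterGames := by
  intro games _
  unfold Spec_filterGames filterGames filterGames_alt
  rw [pvFold_eq_go]
  simp
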